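-- pv_equiv track=rewrite | github.com/christian-miljkovic/interview | CompanyChallenges/company_sm/problem2.py | findContinguousArrays
-- ===== SOURCE A (Python) =====
-- def findContinguousArrays(numbers_list):
--
--     if len(numbers_list) == 1:
--         return numbers_list
--
--     return_list = []
--     temp_list = []
--
--     for j in range(1,len(numbers_list)):
--         if numbers_list[j-1] == numbers_list[j] - 1:
--             if numbers_list[j-1] not in temp_list:
--                 temp_list.append(numbers_list[j-1])
--             temp_list.append(numbers_list[j])
--         else:
--             if len(temp_list) > 0:
--                 return_list.append(temp_list)
--             temp_list = []
--     return return_list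
-- ===== SOURCE B (Python) =====
-- def findContinguousArrays(numbers_list):
--     result = []
--     start = 0
--     for i in range(1, len(numbers_list)):
--         if numbers_list[i] != numbers_list[i - 1] + 1:
--             if i - start >= 2:
--                 result.append(numbers_list[start:i])
--             start = i
--     return result
-- ===== Notes on version B (the rewrite author's own statement) =====
-- stated objective: simpler
-- what changed: B does a single pass tracking only the run's start index and slices the list at a break, instead of A's growing temp list with a per-step membership scan and conditional appends.
-- outside the precondition, e.g. on findContinguousArrays([5]): A returns [5], B returns []
import Mathlib
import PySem

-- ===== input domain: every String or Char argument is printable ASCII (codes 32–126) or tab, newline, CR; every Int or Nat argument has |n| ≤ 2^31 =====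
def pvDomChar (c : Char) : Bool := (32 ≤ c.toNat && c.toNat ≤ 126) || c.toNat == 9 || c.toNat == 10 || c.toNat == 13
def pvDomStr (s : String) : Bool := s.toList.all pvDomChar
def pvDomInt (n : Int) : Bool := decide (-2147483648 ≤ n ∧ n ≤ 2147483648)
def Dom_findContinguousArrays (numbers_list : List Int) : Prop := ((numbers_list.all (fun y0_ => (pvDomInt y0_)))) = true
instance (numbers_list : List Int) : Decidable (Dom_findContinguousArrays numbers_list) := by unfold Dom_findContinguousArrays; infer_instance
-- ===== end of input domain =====

-- ===== PORT A =====
-- B replaces A's growing temp list (with its per-step membership scan) by a start index + a slice at each break.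
-- A's loop: for j in range(1, len): state (return_list, temp_list)
def aGo (xs : List Int) (j : Nat) (ret : List (List Int)) (temp : List Int) : List (List Int) :=
  if _h : j < xs.length then
    if PySem.List.pyGetD xs ((j : Int) - 1) 0 == PySem.List.pyGetD xs (j : Int) 0 - 1 then
      aGo xs (j + 1) ret
        ((if temp.contains (PySem.List.pyGetD xs ((j : Int) - 1) 0) then temp
          else temp ++ [PySem.List.pyGetD xs ((j : Int) - 1) 0]) ++ [PySem.List.pyGetD xs (j : Int) 0])
    else
      aGo xs (j + 1) (if temp.length > 0 then ret ++ [temp] else ret) []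
  else ret
termination_by xs.length - j

def findContinguousArrays (numbers_list : List Int) : List (List Int) :=
  -- On a singleton, Python A returns the flat list numbers_list itself, which is not a value
  -- of the declared return type List (List Int); those inputs are excluded by Pre_ below.
  if numbers_list.length == 1 then [numbers_list]
  else aGo numbers_list 1 [] []

-- ===== PORT B =====
-- B's loop: for i in range(1, len): state (result, start)
def bGo (xs : List Int) (i : Nat) (start : Nat) (res : List (List Int)) : List (List Int) :=
  if _h : i < xs.length then
    if PySem.List.pyGetD xs (i : Int) 0 != PySem.List.pyGetD xs ((i : Int) - 1) 0 + 1 then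
      bGo xs (i + 1) i
        (if 2 <= i - start then res ++ [PySem.List.slice xs (some (start : Int)) (some (i : Int))] else res)
    else bGo xs (i + 1) start res
  else res
termination_by xs.length - i

def findContinguousArrays_alt (numbers_list : List Int) : List (List Int) :=
  bGo numbers_list 1 0 []

-- ===== PRECONDITION & SPEC =====
-- Pre_ excludes exactly the singleton lists, on which A returns the flat list of ints itself
-- (not a list of lists, i.e. not a value of the declared return type).
def Pre_findContinguousArrays (numbers_list : List Int) : Prop := numbers_list.length ≠ 1
instance (numbers_list : List Int) : Decidable (Pre_findContinguousArrays numbers_list) := by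
  unfold Pre_findContinguousArrays; infer_instance
def pvWitness_findContinguousArrays : List Int := [1, 2, 5]
def Spec_findContinguousArrays (numbers_list : List Int) (out : List (List Int)) : Prop := out = findContinguousArrays_alt numbers_list
instance (numbers_list : List Int) (out : List (List Int)) : Decidable (Spec_findContinguousArrays numbers_list out) := by unfold Spec_findContinguousArrays; infer_instance

-- ===== CLAIM (what is proved, stated in full; the proofs are below) =====
def Claim_equal_findContinguousArrays : Prop := ∀ (numbers_list : List Int), Dom_findContinguousArrays numbers_list → Pre_findContinguousArrays numbers_list → Spec_findContinguousArrays numbers_list (findContinguousArrays numbers_list)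

-- ===== LEMMAS AND PROOFS =====

-- glue fact: an in-range element of the slice l[a:b]
lemma getElem_mem_take_drop (l : List Int) (a b i : Nat) (h1 : a ≤ i) (h2 : i < b)
    (h3 : i < l.length) : l[i] ∈ (l.drop a).take (b - a) := by
  have hidx : i - a < ((l.drop a).take (b - a)).length := by simp; omega
  refine List.mem_iff_getElem.mpr ⟨i - a, hidx, ?_⟩
  rw [List.getElem_take, List.getElem_drop]
  have e : a + (i - a) = i := by omega
  simp [e]

-- The loop invariant: before processing index j, A's temp_list is either empty with B's
-- start = j - 1, or the open run's slice xs[start:j] (of length >= 2).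
lemma go_eq (xs : List Int) (n : Nat) : ∀ (j start : Nat) (ret : List (List Int)) (temp : List Int),
    n = xs.length - j → 1 ≤ j →
    ((start = j - 1 ∧ temp = []) ∨
      (start + 2 ≤ j ∧ j ≤ xs.length ∧ temp = (xs.drop start).take (j - start))) →
    aGo xs j ret temp = bGo xs j start ret := by
  induction n with
  | zero =>
    intro j start ret temp hn hj _
    have h : ¬ j < xs.length := by omega
    rw [aGo, bGo, dif_neg h, dif_neg h]
  | succ n ih =>
    intro j start ret temp hn hj hinv
    by_cases h : j < xs.length
    · obtain ⟨k, rfl⟩ : ∃ k, j = k + 1 := ⟨j - 1, by omega⟩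
      have hk : k < xs.length := by omega
      have e1 : PySem.List.pyGetD xs ((↑(k + 1) : Int) - 1) 0 = xs[k] := by
        have e : ((↑(k + 1) : Int) - 1) = ((k : Nat) : Int) := by push_cast; ring
        rw [e, PySem.List.pyGetD_natCast]; exact List.getD_eq_getElem xs 0 hk
      have e2 : PySem.List.pyGetD xs (↑(k + 1) : Int) 0 = xs[k + 1] := by
        rw [PySem.List.pyGetD_natCast]; exact List.getD_eq_getElem xs 0 h
      rw [aGo, bGo, dif_pos h, dif_pos h, e1, e2]
      by_cases hc : xs[k] = xs[k + 1] - 1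
      · have cA : (xs[k] == xs[k + 1] - 1) = true := by simpa using hc
        have cB : ¬((xs[k + 1] != xs[k] + 1) = true) := by
          simp only [bne_iff_ne, ne_eq, not_not]; rw [hc]; ring
        rw [if_pos cA, if_neg cB]
        rcases hinv with ⟨hs, rfl⟩ | ⟨hs2, hsl, htemp⟩
        · have hs' : start = k := by omega
          subst hs'
          have cn : ¬(List.elem xs[start] ([] : List Int) = true) := by simp
          rw [if_neg cn]
          refine ih (start + 1 + 1) start ret _ (by omega) (by omega)
            (Or.inr ⟨by omega, by omega, ?_⟩)
          have e3 : start + 1 + 1 - start = 2 := by omega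
          rw [e3, List.drop_eq_getElem_cons hk, List.drop_eq_getElem_cons h]
          rfl
        · have hmem : xs[k] ∈ temp := by
            rw [htemp]; exact getElem_mem_take_drop xs start (k + 1) k (by omega) (by omega) hk
          rw [if_pos (show temp.contains xs[k] = true by simpa using hmem)]
          refine ih (k + 1 + 1) start ret _ (by omega) (by omega)
            (Or.inr ⟨by omega, by omega, ?_⟩)
          have e3 : k + 1 + 1 - start = (k + 1 - start) + 1 := by omega
          rw [e3, List.take_succ_eq_append_getElem (by simp; omega), htemp, List.getElem_drop]
          have e4 : start + (k + 1 - start) = k + 1 := by omega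
          simp [e4]
      · have cA : ¬((xs[k] == xs[k + 1] - 1) = true) := by simpa using hc
        have cB : (xs[k + 1] != xs[k] + 1) = true := by
          simp only [bne_iff_ne, ne_eq]; intro e; exact hc (by rw [e]; ring)
        rw [if_neg cA, if_pos cB]
        rcases hinv with ⟨hs, rfl⟩ | ⟨hs2, hsl, htemp⟩
        · have hs' : start = k := by omega
          subst hs'
          have ln0 : ¬(List.length ([] : List Int) > 0) := by simp
          have c2 : ¬(2 ≤ start + 1 - start) := by omega
          rw [if_neg ln0, if_neg c2]
          exact ih (start + 1 + 1) (start + 1) ret [] (by omega) (by omega)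
            (Or.inl ⟨by omega, rfl⟩)
        · have hlen : temp.length > 0 := by rw [htemp]; simp; omega
          have c2 : 2 ≤ k + 1 - start := by omega
          rw [if_pos hlen, if_pos c2, PySem.List.slice_natCast, ← htemp]
          exact ih (k + 1 + 1) (k + 1) (ret ++ [temp]) [] (by omega) (by omega)
            (Or.inl ⟨by omega, rfl⟩)
    · rw [aGo, bGo, dif_neg h, dif_neg h]

-- ===== VERDICT (by name: the statement is the Claim_ definition above) =====
theorem findContinguousArrays_spec : Claim_equal_findContinguousArrays := by
  intro xs _ hpre
  unfold Spec_findContinguousArrays findContinguousArrays findContinguousArrays_alt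
  rw [if_neg (by simpa using hpre)]
  exact go_eq xs (xs.length - 1) 1 0 [] [] rfl le_rfl (Or.inl ⟨rfl, rfl⟩)
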